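-- pv_equiv track=rewrite | github.com/Rajeshkumark26/Algorithms_coding_practice | isZeroSum.py | isZeroSum
-- ===== SOURCE A (Python) =====
-- def isZeroSum(array):
--     preSum=0
--     h=set()
--     for i in range(len(array)):
--         preSum += array[i]
--         if preSum == 0 or preSum in h:
--             return True
--         else:
--             h.add(preSum)
--     return False
-- ===== SOURCE B (Python) =====
-- def isZeroSum(array):
--     n = len(array)
--     for i in range(n):
--         s = 0
--         for j in range(i, n):
--             s += array[j]
--             if s == 0:
--                 return True
--     return False
-- ===== Notes on version B (the rewrite author's own statement) =====
-- stated objective: alternative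
-- what changed: Replaced the prefix-sum hash-set scan by a direct brute-force double loop that checks every contiguous subarray's running sum.
import Mathlib
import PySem

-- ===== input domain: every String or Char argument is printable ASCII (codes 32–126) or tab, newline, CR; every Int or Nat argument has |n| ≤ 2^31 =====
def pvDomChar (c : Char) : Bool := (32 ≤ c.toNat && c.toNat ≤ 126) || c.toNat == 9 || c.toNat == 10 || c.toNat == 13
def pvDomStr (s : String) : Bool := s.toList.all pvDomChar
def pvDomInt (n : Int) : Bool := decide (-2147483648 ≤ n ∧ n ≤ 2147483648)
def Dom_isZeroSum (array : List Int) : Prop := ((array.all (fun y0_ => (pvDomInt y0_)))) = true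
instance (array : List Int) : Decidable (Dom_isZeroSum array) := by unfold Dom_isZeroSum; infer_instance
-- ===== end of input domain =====

-- B replaces A's prefix-sum-with-hash-set scan by a brute-force double loop over all
-- contiguous subarrays (objective: alternative; not faster).

-- ===== PORT A =====
-- the for-loop over range(len(array)) with state (preSum, h), transliterated as
-- structural recursion over the list with the same state
def isZeroSumGoA : List Int → Int → PySem.Set Int → Bool
  | [], _, _ => false
  | x :: xs, preSum, h =>
    let p := preSum + x
    if p == 0 || PySem.Set.contains h p then true
    else isZeroSumGoA xs p (PySem.Set.add h p)

def isZeroSum (array : List Int) : Bool :=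
  isZeroSumGoA array 0 PySem.Set.empty

-- ===== PORT B =====
-- inner loop: running sum s over the rest of the list, return True on s == 0
def isZeroSumInnerB : Int → List Int → Bool
  | _, [] => false
  | s, x :: xs => if s + x == 0 then true else isZeroSumInnerB (s + x) xs

-- outer loop: try every start position
def isZeroSumOuterB : List Int → Bool
  | [] => false
  | x :: xs => if isZeroSumInnerB 0 (x :: xs) then true else isZeroSumOuterB xs

def isZeroSum_alt (array : List Int) : Bool :=
  isZeroSumOuterB array

-- ===== PRECONDITION & SPEC =====
def Spec_isZeroSum (array : List Int) (out : Bool) : Prop := out = isZeroSum_alt array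
instance (array : List Int) (out : Bool) : Decidable (Spec_isZeroSum array out) := by unfold Spec_isZeroSum; infer_instance

-- ===== CLAIM (what is proved, stated in full; the proofs are below) =====
def Claim_equal_isZeroSum : Prop := ∀ (array : List Int), Dom_isZeroSum array → Spec_isZeroSum array (isZeroSum array)

-- ===== LEMMAS AND PROOFS =====

-- the common specification: some nonempty contiguous subarray sums to zero
def ZeroSub (xs : List Int) : Prop :=
  ∃ a b c : List Int, xs = a ++ b ++ c ∧ b ≠ [] ∧ b.sum = 0

theorem innerB_iff (t : List Int) : ∀ s : Int,
    (isZeroSumInnerB s t = true ↔ ∃ p q : List Int, t = p ++ q ∧ p ≠ [] ∧ s + p.sum = 0) := by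
  induction t with
  | nil =>
    intro s
    simp only [isZeroSumInnerB]
    constructor
    · intro h; cases h
    · rintro ⟨p, q, hpq, hp, -⟩
      exact absurd (List.append_eq_nil_iff.mp hpq.symm).1 hp
  | cons x xs ih =>
    intro s
    by_cases h0 : s + x = 0
    · have hstep : isZeroSumInnerB s (x :: xs) = true := by
        simp [isZeroSumInnerB, h0]
      rw [hstep]
      exact iff_of_true rfl ⟨[x], xs, rfl, by simp, by simpa using h0⟩
    · have hstep : isZeroSumInnerB s (x :: xs) = isZeroSumInnerB (s + x) xs := by
        simp [isZeroSumInnerB, h0]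
      rw [hstep, ih (s + x)]
      constructor
      · rintro ⟨p, q, hpq, hp, hsum⟩
        exact ⟨x :: p, q, by simp [hpq], by simp, by simpa [add_assoc] using hsum⟩
      · rintro ⟨p, q, hpq, hp, hsum⟩
        cases p with
        | nil => exact absurd rfl hp
        | cons y p' =>
          have hy : x = y := by simpa using congrArg (fun l => l.headI) hpq
          subst hy
          have hxs : xs = p' ++ q := by simpa using hpq
          cases p' with
          | nil =>
            exfalso; apply h0; simpa using hsum
          | cons z p'' =>
            exact ⟨z :: p'', q, hxs, by simp, by simpa [add_assoc] using hsum⟩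

theorem outerB_iff (xs : List Int) : isZeroSumOuterB xs = true ↔ ZeroSub xs := by
  induction xs with
  | nil =>
    simp only [isZeroSumOuterB]
    constructor
    · intro h; cases h
    · rintro ⟨a, b, c, habc, hb, -⟩
      have := List.append_eq_nil_iff.mp habc.symm
      exact absurd (List.append_eq_nil_iff.mp this.1).2 hb
  | cons x xs ih =>
    by_cases hin : isZeroSumInnerB 0 (x :: xs) = true
    · have hstep : isZeroSumOuterB (x :: xs) = true := by
        simp [isZeroSumOuterB, hin]
      rw [hstep]
      obtain ⟨p, q, hpq, hp, hs⟩ := (innerB_iff (x :: xs) 0).mp hin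
      exact iff_of_true rfl ⟨[], p, q, by simpa using hpq, hp, by simpa using hs⟩
    · have hstep : isZeroSumOuterB (x :: xs) = isZeroSumOuterB xs := by
        simp [isZeroSumOuterB, hin]
      rw [hstep, ih]
      constructor
      · rintro ⟨a, b, c, habc, hb, hs⟩
        exact ⟨x :: a, b, c, by simp [habc], hb, hs⟩
      · rintro ⟨a, b, c, habc, hb, hs⟩
        cases a with
        | nil =>
          exfalso; apply hin
          exact (innerB_iff (x :: xs) 0).mpr ⟨b, c, by simpa using habc, hb, by simpa using hs⟩
        | cons y a' =>
          have hy : x = y := by simpa using congrArg (fun l => l.headI) habc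
          subst hy
          exact ⟨a', b, c, by simpa using habc, hb, hs⟩

-- characterisation of A's loop, generalised over the accumulated prefix sum and set
theorem goA_iff (xs : List Int) : ∀ (pre : Int) (h : PySem.Set Int),
    (isZeroSumGoA xs pre h = true ↔
      ∃ p q : List Int, xs = p ++ q ∧ p ≠ [] ∧
        (pre + p.sum = 0 ∨ (pre + p.sum) ∈ h ∨
          ∃ p1 p2 : List Int, p = p1 ++ p2 ∧ p1 ≠ [] ∧ p2 ≠ [] ∧ p2.sum = 0)) := by
  induction xs with
  | nil =>
    intro pre h
    simp only [isZeroSumGoA]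
    constructor
    · intro hc; cases hc
    · rintro ⟨p, q, hpq, hp, -⟩
      exact absurd (List.append_eq_nil_iff.mp hpq.symm).1 hp
  | cons x xs ih =>
    intro pre h
    by_cases hc : pre + x = 0 ∨ (pre + x) ∈ h
    · have hstep : isZeroSumGoA (x :: xs) pre h = true := by
        simp [isZeroSumGoA]
        exact Or.inl hc
      rw [hstep]
      refine iff_of_true rfl ⟨[x], xs, rfl, by simp, ?_⟩
      rcases hc with hc | hc
      · exact Or.inl (by simpa using hc)
      · exact Or.inr (Or.inl (by simpa using hc))
    · push_neg at hc
      obtain ⟨hne, hnm⟩ := hc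
      have hstep : isZeroSumGoA (x :: xs) pre h =
          isZeroSumGoA xs (pre + x) (PySem.Set.add h (pre + x)) := by
        simp [isZeroSumGoA]
        intro hcc
        exact absurd hcc (not_or.mpr ⟨hne, hnm⟩)
      rw [hstep, ih (pre + x) (PySem.Set.add h (pre + x))]
      constructor
      · rintro ⟨p, q, hpq, hp, hd⟩
        refine ⟨x :: p, q, by simp [hpq], by simp, ?_⟩
        rcases hd with hd | hd | ⟨p1, p2, hsplit, hp1, hp2, hs2⟩
        · exact Or.inl (by simpa [add_assoc] using hd)
        · rcases (PySem.Set.mem_add h (pre + x) (pre + x + p.sum)).mp hd with hd | hd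
          · exact Or.inr (Or.inl (by simpa [add_assoc] using hd))
          · -- pre + x + p.sum = pre + x : p itself sums to zero
            have hps : p.sum = 0 := by omega
            exact Or.inr (Or.inr ⟨[x], p, rfl, by simp, hp, hps⟩)
        · exact Or.inr (Or.inr ⟨x :: p1, p2, by simp [hsplit], by simp, hp2, hs2⟩)
      · rintro ⟨p, q, hpq, hp, hd⟩
        cases p with
        | nil => exact absurd rfl hp
        | cons y p' =>
          have hy : x = y := by simpa using congrArg (fun l => l.headI) hpq
          subst hy
          have hxs : xs = p' ++ q := by simpa using hpq
          rcases hd with hd | hd | ⟨p1, p2, hsplit, hp1, hp2, hs2⟩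
          · -- pre + (x :: p').sum = 0
            cases p' with
            | nil => exact absurd (by simpa using hd) hne
            | cons z p'' =>
              exact ⟨z :: p'', q, hxs, by simp,
                Or.inl (by simpa [add_assoc] using hd)⟩
          · -- pre + (x :: p').sum ∈ h
            cases p' with
            | nil => exact absurd (by simpa using hd) hnm
            | cons z p'' =>
              refine ⟨z :: p'', q, hxs, by simp, Or.inr (Or.inl ?_)⟩
              exact (PySem.Set.mem_add h (pre + x) (pre + x + (z :: p'').sum)).mpr
                (Or.inl (by simpa [add_assoc] using hd))
          · -- a duplicate inside x :: p'
            cases p1 with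
            | nil => exact absurd rfl hp1
            | cons w p1' =>
              have hw : x = w := by simpa using congrArg (fun l => l.headI) hsplit
              subst hw
              have hp'eq : p' = p1' ++ p2 := by simpa using hsplit
              cases p1' with
              | nil =>
                -- p' = p2 sums to zero: pre + x + p'.sum = pre + x ∈ add h (pre + x)
                refine ⟨p2, q, by simpa [hp'eq] using hxs, hp2, Or.inr (Or.inl ?_)⟩
                have hps : p2.sum = 0 := hs2
                exact (PySem.Set.mem_add h (pre + x) (pre + x + p2.sum)).mpr
                  (Or.inr (by omega))
              | cons u p1'' =>
                exact ⟨p', q, hxs, by simp [hp'eq],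
                  Or.inr (Or.inr ⟨u :: p1'', p2, hp'eq, by simp, hp2, hs2⟩)⟩

theorem portA_iff (xs : List Int) : isZeroSum xs = true ↔ ZeroSub xs := by
  unfold isZeroSum
  rw [goA_iff xs 0 PySem.Set.empty]
  constructor
  · rintro ⟨p, q, hpq, hp, hd⟩
    rcases hd with hd | hd | ⟨p1, p2, hsplit, hp1, hp2, hs2⟩
    · exact ⟨[], p, q, by simpa using hpq, hp, by simpa using hd⟩
    · cases hd
    · exact ⟨p1, p2, q, by simp [hpq, hsplit], hp2, hs2⟩
  · rintro ⟨a, b, c, habc, hb, hs⟩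
    refine ⟨a ++ b, c, by simp [habc], by simp [hb], ?_⟩
    cases a with
    | nil => exact Or.inl (by simpa using hs)
    | cons y a' =>
      exact Or.inr (Or.inr ⟨y :: a', b, rfl, by simp, hb, hs⟩)

-- ===== VERDICT (by name: the statement is the Claim_ definition above) =====
theorem isZeroSum_spec : Claim_equal_isZeroSum := by
  intro array _
  unfold Spec_isZeroSum
  rw [Bool.eq_iff_iff, portA_iff]
  unfold isZeroSum_alt
  rw [outerB_iff]
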